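-- pv_equiv track=rewrite | github.com/lakshayprajapati909-glitch/Pythonpabl | count even letter.py | count
-- ===== SOURCE A (Python) =====
-- def count(s):
--     freq={}
--     for i in s:
--         if i in freq:
--             freq[i]+=1
--         else:
--             freq[i]=1
--     count=0
--
--     for v in freq.values():
--         if v%2==0:
--             count+=1
--
--     return count
-- ===== SOURCE B (Python) =====
-- def count(s):
--     t = sorted(s)
--     total = 0
--     i = 0
--     while i < len(t):
--         j = i + 1
--         while j < len(t) and t[j] == t[i]:
--             j += 1
--         if (j - i) % 2 == 0:
--             total += 1
--         i = j
--     return total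
-- ===== Notes on version B (the rewrite author's own statement) =====
-- stated objective: alternative
-- what changed: Replaces the dict frequency table and its values scan with a single sort followed by one grouped pass over runs of equal characters, counting runs of even length.
import Mathlib
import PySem

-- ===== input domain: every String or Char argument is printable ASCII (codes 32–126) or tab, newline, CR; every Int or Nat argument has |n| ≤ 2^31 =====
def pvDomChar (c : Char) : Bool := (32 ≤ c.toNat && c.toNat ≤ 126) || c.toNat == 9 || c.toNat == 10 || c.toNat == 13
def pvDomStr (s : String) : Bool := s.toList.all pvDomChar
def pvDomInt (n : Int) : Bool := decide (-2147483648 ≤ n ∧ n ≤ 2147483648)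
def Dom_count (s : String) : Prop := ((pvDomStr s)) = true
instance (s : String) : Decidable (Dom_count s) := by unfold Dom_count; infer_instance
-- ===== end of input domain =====

-- B replaces A's dict frequency table with sort + one grouped pass over runs (alternative algorithm, not claimed faster).

-- ===== PORT A =====
-- freq = {}; for i in s: freq[i] += 1 / = 1; then count values with v % 2 == 0
def count (s : String) : Int :=
  let freq := s.toList.foldl
    (fun freq i => if freq.contains i then freq.modify i 0 (· + 1) else freq.insert i 1)
    (PySem.Dict.empty : PySem.Dict Char Int)
  freq.values.foldl (fun count v => if PySem.Int.mod v 2 == 0 then count + 1 else count) 0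

-- ===== PORT B =====
-- the outer while loop of Source B: each step consumes one run of equal chars (j - i = run length)
def countRuns : List Char → Int
  | [] => 0
  | c :: rest =>
    (if ((rest.takeWhile (fun x => x == c)).length + 1) % 2 == 0 then 1 else 0)
      + countRuns (rest.dropWhile (fun x => x == c))
  termination_by l => l.length
  decreasing_by
    exact Nat.lt_succ_of_le (List.length_dropWhile_le _ _)

def count_alt (s : String) : Int :=
  countRuns (PySem.List.sorted s.toList (fun x => x) false)

-- ===== PRECONDITION & SPEC =====
def Spec_count (s : String) (out : Int) : Prop := out = count_alt s
instance (s : String) (out : Int) : Decidable (Spec_count s out) := by unfold Spec_count; infer_instance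

-- ===== CLAIM (what is proved, stated in full; the proofs are below) =====
def Claim_equal_count : Prop := ∀ (s : String), Dom_count s → Spec_count s (count s)

-- ===== LEMMAS AND PROOFS =====

-- Python's v % 2 on a Nat-count cast to Int is the Nat remainder
lemma pymod_two_natCast (m : Nat) : PySem.Int.mod (m : Int) 2 = ((m % 2 : Nat) : Int) := by
  show Int.fmod _ _ = _
  rw [Int.fmod_eq_emod]
  simp

lemma test_eq (m : Nat) : (PySem.Int.mod (m : Int) 2 == 0) = (m % 2 == 0) := by
  rw [pymod_two_natCast]
  cases h : m % 2 == 0 <;> simp_all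

-- the two branches of A's first loop are one Dict.modify
lemma step_eq (d : PySem.Dict Char Int) (i : Char) :
    (if d.contains i then d.modify i 0 (· + 1) else d.insert i 1) = d.modify i 0 (· + 1) := by
  split_ifs with h
  · rfl
  · show d.insert i 1 = d.insert i (d.getD i 0 + 1)
    rw [PySem.Dict.getD_of_not_contains (h := by simpa using h)]
    norm_num

-- hence A's first loop builds Counter(s)
lemma freq_eq (xs : List Char) :
    xs.foldl (fun d i => if d.contains i then d.modify i 0 (· + 1) else d.insert i 1)
        (PySem.Dict.empty : PySem.Dict Char Int)
      = PySem.Dict.counter xs := by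
  rw [PySem.Dict.counter_eq_foldl]
  congr 1
  funext d i
  exact step_eq d i

-- a counting fold is countP
lemma foldl_count_int (p : Char → Bool) (ks : List Char) (a : Int) :
    ks.foldl (fun c k => if p k then c + 1 else c) a = a + (ks.countP p : Int) := by
  induction ks generalizing a with
  | nil => simp
  | cons k ks ih =>
    simp only [List.foldl_cons, List.countP_cons, ih]
    split_ifs <;> push_cast <;> ring

-- countP on a duplicate-free list is a Finset cardinality
lemma countP_nodup_card (n : List Char) (p : Char → Bool) (hn : n.Nodup) :
    (n.countP p : Int) = ((n.toFinset.filter (fun k => p k = true)).card : Int) := by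
  rw [List.countP_eq_length_filter, ← List.toFinset_filter,
    List.toFinset_card_of_nodup (hn.filter p)]

-- A counts the distinct characters of s whose multiplicity is even
lemma count_eq_card (s : String) :
    count s = (((s.toList.toFinset.filter
        (fun k => s.toList.count k % 2 = 0)).card : Nat) : Int) := by
  unfold count
  simp only [freq_eq]
  rw [PySem.Dict.values_eq_map_keys _ (PySem.Dict.nodup_keys_counter _) 0]
  simp only [PySem.Dict.keys_counter]
  rw [List.foldl_map]
  simp only [PySem.Dict.getD_counter, test_eq]
  rw [foldl_count_int (fun k => s.toList.count k % 2 == 0) _ 0]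
  rw [countP_nodup_card _ _ (PySem.Set.nodup_ofList _)]
  norm_num
  have : (PySem.Set.ofList s.toList : List Char).toFinset = s.toList.toFinset := by
    ext x; simp [PySem.Set.mem_ofList]
  rw [this]

-- B on a sorted list counts the distinct characters whose multiplicity is even
lemma countRuns_sorted (l : List Char) (h : l.Pairwise (· ≤ ·)) :
    countRuns l = (((l.toFinset.filter (fun k => l.count k % 2 = 0)).card : Nat) : Int) := by
  induction l using countRuns.induct with
  | case1 => simp [countRuns]
  | case2 c rest ih =>
    set run := rest.takeWhile (fun x => x == c) with hrundef
    set tail := rest.dropWhile (fun x => x == c) with htaildef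
    have hsplit : run ++ tail = rest := List.takeWhile_append_dropWhile
    have hrun : ∀ x ∈ run, x = c := by
      intro x hx
      have := List.mem_takeWhile_imp hx
      simpa using this
    have hpw_rest : rest.Pairwise (· ≤ ·) := h.of_cons
    have hle : ∀ x ∈ rest, c ≤ x := fun x hx => List.rel_of_pairwise_cons h hx
    have htail_sub : tail.Sublist rest := List.dropWhile_sublist _
    have htail_pw : tail.Pairwise (· ≤ ·) := hpw_rest.sublist htail_sub
    have hc_not : c ∉ tail := by
      cases htl : tail with
      | nil => simp
      | cons d t' =>
        have hne : rest.dropWhile (fun x => x == c) ≠ [] := by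
          rw [← htaildef, htl]; simp
        have hd : ((rest.dropWhile (fun x => x == c)).head hne == c) = false :=
          List.head_dropWhile_not (fun x => x == c) hne
        have hdc : d ≠ c := by
          intro hdc
          have heq : rest.dropWhile (fun x => x == c) = d :: t' := by
            rw [← htaildef]; exact htl
          have : (List.dropWhile (fun x => x == c) rest).head hne = d := by
            simp [heq]
          rw [this, hdc] at hd
          simp at hd
        have hdmem : d ∈ rest := htail_sub.mem (by simp [htl])
        have hcd : c ≤ d := hle d hdmem
        intro hc
        rw [htl] at htail_pw
        rcases List.mem_cons.mp hc with h1 | h2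
        · exact hdc h1.symm
        · exact hdc (le_antisymm (List.rel_of_pairwise_cons htail_pw h2) hcd)
    have hcount_run : run.count c = run.length :=
      List.count_eq_length.mpr (fun b hb => (hrun b hb).symm)
    have htailc : tail.count c = 0 := List.count_eq_zero.mpr hc_not
    have hcountc : (c :: rest).count c = run.length + 1 := by
      rw [List.count_cons_self, ← hsplit, List.count_append, hcount_run, htailc]
    have hcountk : ∀ k, k ≠ c → (c :: rest).count k = tail.count k := by
      intro k hk
      have h0 : run.count k = 0 := List.count_eq_zero.mpr (fun hm => hk (hrun k hm))
      rw [← hsplit] at *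
      simp [List.count_append, h0, Ne.symm hk]
    have hfs : (c :: rest).toFinset = insert c tail.toFinset := by
      ext x
      simp only [List.mem_toFinset, List.mem_cons, Finset.mem_insert, ← hsplit,
        List.mem_append]
      constructor
      · rintro (rfl | hx | hx)
        · exact Or.inl rfl
        · exact Or.inl (hrun x hx)
        · exact Or.inr hx
      · rintro (rfl | hx)
        · exact Or.inl rfl
        · exact Or.inr (Or.inr hx)
    have hcfs : c ∉ tail.toFinset := by simpa using hc_not
    have hfilter_congr : tail.toFinset.filter (fun k => (c :: rest).count k % 2 = 0)
        = tail.toFinset.filter (fun k => tail.count k % 2 = 0) := by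
      apply Finset.filter_congr
      intro x hx
      have hxne : x ≠ c := fun e => hcfs (e ▸ hx)
      rw [hcountk x hxne]
    rw [countRuns, ih htail_pw, hfs, Finset.filter_insert, hfilter_congr, hcountc]
    by_cases hP : (run.length + 1) % 2 = 0
    · rw [if_pos hP, if_pos (by simpa using hP),
        Finset.card_insert_of_notMem (fun hm => hcfs (Finset.mem_filter.mp hm).1)]
      push_cast
      ring
    · rw [if_neg hP, if_neg (by simpa using hP)]
      ring

-- B computes the same cardinality, through the sorted permutation of s
lemma count_alt_eq_card (s : String) :
    count_alt s = (((s.toList.toFinset.filter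
        (fun k => s.toList.count k % 2 = 0)).card : Nat) : Int) := by
  unfold count_alt
  have hpw : (PySem.List.sorted s.toList (fun x => x) false).Pairwise (· ≤ ·) :=
    PySem.List.sorted_pairwise s.toList (fun x => x)
  have hperm : (PySem.List.sorted s.toList (fun x => x) false).Perm s.toList :=
    PySem.List.sorted_perm s.toList (fun x => x) false
  rw [countRuns_sorted _ hpw]
  congr 1
  have hfin : (PySem.List.sorted s.toList (fun x => x) false).toFinset
      = s.toList.toFinset := by
    ext x; simp [hperm.mem_iff]
  rw [Finset.filter_congr (fun x _ => by rw [hperm.count_eq]), hfin]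

-- ===== VERDICT (by name: the statement is the Claim_ definition above) =====
theorem count_spec : Claim_equal_count := by
  intro s _
  show count s = count_alt s
  rw [count_eq_card, count_alt_eq_card]
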